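-- pv_equiv track=rewrite | github.com/godisu524/AlgorithmPractice | 11street/1.py | solution
-- ===== SOURCE A (Python) =====
-- def solution(A):
--     # write your code in Python 3.6
--
--     ans=0
--     nums={}
--     max_num = max(A)
--     for i in A:
--         try:
--             nums[i] +=1
--         except:
--             nums[i] = 1
--
--     for num in nums:
--         if nums[num] ==2:
--             ans+=2
--         else:
--             ans+=1
--     if nums[max_num] ==2:
--         ans-=1
--     return ans
-- ===== SOURCE B (Python) =====
-- def solution(A):
--     ans = 0
--     run = 0              # length of the current run of equal values in sorted order
--     prev = None
--     for x in sorted(A):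
--         if run > 0 and x == prev:
--             run += 1
--         else:
--             if run > 0:
--                 ans += 2 if run == 2 else 1
--             run = 1
--             prev = x
--     if run > 0:
--         ans += 2 if run == 2 else 1
--         if run == 2:
--             ans -= 1
--     return ans
-- ===== Notes on version B (the rewrite author's own statement) =====
-- stated objective: faster
-- what changed: B sorts the list once and scans consecutive runs of equal values with a constant-size state (run length and previous value) instead of building a frequency dictionary and iterating over its keys; the maximum's correction becomes a check on the final run.
-- crash fix: On the empty list A raises ValueError (from max(A)); B naturally returns 0. — e.g. on solution([]): A raises ValueError, B returns 0
import Mathlib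
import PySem

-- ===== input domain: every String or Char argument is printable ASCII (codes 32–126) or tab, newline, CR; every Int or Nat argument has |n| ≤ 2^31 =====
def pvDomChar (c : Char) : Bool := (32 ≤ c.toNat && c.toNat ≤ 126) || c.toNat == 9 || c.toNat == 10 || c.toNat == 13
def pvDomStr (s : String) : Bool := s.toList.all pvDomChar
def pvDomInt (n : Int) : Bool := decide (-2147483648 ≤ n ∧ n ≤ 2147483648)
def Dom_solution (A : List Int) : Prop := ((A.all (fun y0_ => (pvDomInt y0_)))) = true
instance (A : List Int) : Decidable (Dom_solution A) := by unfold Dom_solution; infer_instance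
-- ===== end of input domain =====

-- B sorts once and scans consecutive runs with a constant-size state instead of building a
-- frequency dictionary; equal return values proved on non-empty lists (A raises ValueError on []).

-- ===== PORT A =====
def solution (A : List Int) : Int :=
  match PySem.List.max? A (fun x => x) with
  | none => 0  -- max([]) raises ValueError; excluded by Pre_solution
  | some maxNum =>
    let nums := A.foldl (fun d i => d.modify i 0 (· + 1)) (PySem.Dict.empty : PySem.Dict Int Int)
    let ans := nums.keys.foldl (fun ans num => if nums.getD num 0 == 2 then ans + 2 else ans + 1) (0 : Int)
    if nums.getD maxNum 0 == 2 then ans - 1 else ans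

-- ===== PORT B =====
-- one fold step of B's scan over the sorted list; state = (ans, run, prev)
def altStep (st : Int × Nat × Int) (x : Int) : Int × Nat × Int :=
  if st.2.1 > 0 && x == st.2.2 then (st.1, st.2.1 + 1, st.2.2)
  else ((if st.2.1 > 0 then st.1 + (if st.2.1 == 2 then 2 else 1) else st.1), 1, x)

def solution_alt (A : List Int) : Int :=
  let st := (PySem.List.sorted A (fun x => x) false).foldl altStep (0, 0, 0)
  if st.2.1 > 0 then
    let ans := st.1 + (if st.2.1 == 2 then 2 else 1)
    if st.2.1 == 2 then ans - 1 else ans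
  else st.1

-- ===== PRECONDITION & SPEC =====
-- Pre_ excludes only the empty list, on which A's max(A) raises ValueError.
def Pre_solution (A : List Int) : Prop := A ≠ []
instance (A : List Int) : Decidable (Pre_solution A) := by unfold Pre_solution; infer_instance
def pvWitness_solution : List Int := [1, 2, 2]

-- On the empty list A raises ValueError (from max(A)); B naturally returns 0.
def Raises_solution (A : List Int) : Prop := A = []
instance (A : List Int) : Decidable (Raises_solution A) := by unfold Raises_solution; infer_instance
def pvRaiseWitness_solution : List Int := []
def pvRaiseWitnessOut_solution : Int := 0

def Spec_solution (A : List Int) (out : Int) : Prop := out = solution_alt A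
instance (A : List Int) (out : Int) : Decidable (Spec_solution A out) := by unfold Spec_solution; infer_instance

-- ===== CLAIM (what is proved, stated in full; the proofs are below) =====
def Claim_equal_solution : Prop := ∀ (A : List Int), Dom_solution A → Pre_solution A → Spec_solution A (solution A)
def Claim_raises_solution : Prop := (∀ (A : List Int), Dom_solution A → Raises_solution A → ¬ Pre_solution A) ∧ (Dom_solution (pvRaiseWitness_solution) ∧ Raises_solution (pvRaiseWitness_solution) ∧ solution_alt (pvRaiseWitness_solution) = pvRaiseWitnessOut_solution)

-- ===== LEMMAS AND PROOFS =====

-- run lengths of maximal blocks of consecutive equal values (proof-side view of B's scan)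
def runsGo (v : Int) (c : Nat) : List Int → List Nat
  | [] => [c]
  | x :: xs => if x == v then runsGo v (c + 1) xs else c :: runsGo x 1 xs

def runLens : List Int → List Nat
  | [] => []
  | x :: xs => runsGo x 1 xs

-- per-distinct-value contribution
def gcontrib (r : Nat) : Int := if r == 2 then 2 else 1

lemma runsGo_ne_nil (v : Int) (c : Nat) (s : List Int) : runsGo v c s ≠ [] := by
  induction s generalizing v c with
  | nil => simp [runsGo]
  | cons x xs ih => simp only [runsGo]; split <;> simp [ih]

lemma runsGo_pos (v : Int) (c : Nat) (s : List Int) (hc : 1 ≤ c) :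
    ∀ r ∈ runsGo v c s, 1 ≤ r := by
  induction s generalizing v c with
  | nil => simpa [runsGo] using hc
  | cons x xs ih =>
    intro r hr
    simp only [runsGo] at hr
    split at hr
    · exact ih v (c + 1) (by omega) r hr
    · rcases List.mem_cons.mp hr with h | h
      · omega
      · exact ih x 1 le_rfl r h

lemma getLastD_mem' {α : Type} (l : List α) (hne : l ≠ []) (d : α) : l.getLastD d ∈ l := by
  rw [List.getLastD_eq_getLast?, List.getLast?_eq_some_getLast hne]
  exact List.getLast_mem hne

lemma getLastD_map' {α β : Type} (l : List α) (f : α → β) (hne : l ≠ []) (d : α) (d' : β) :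
    (l.map f).getLastD d' = f (l.getLastD d) := by
  rw [List.getLastD_eq_getLast?, List.getLastD_eq_getLast?, List.getLast?_map,
    List.getLast?_eq_some_getLast hne]
  rfl

lemma sum_map_dropLast (l : List Nat) (hne : l ≠ []) :
    (l.map gcontrib).sum = ((l.dropLast).map gcontrib).sum + gcontrib (l.getLastD 0) := by
  conv_lhs => rw [← List.dropLast_append_getLast hne]
  rw [List.map_append, List.sum_append, List.getLastD_eq_getLast?,
    List.getLast?_eq_some_getLast hne]
  simp

lemma foldl_altStep (s : List Int) : ∀ (ans : Int) (run : Nat) (prev : Int), 1 ≤ run →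
    ∃ v, s.foldl altStep (ans, run, prev) =
      (ans + (((runsGo prev run s).dropLast).map gcontrib).sum,
       (runsGo prev run s).getLastD 0, v) := by
  induction s with
  | nil =>
    intro ans run prev _
    exact ⟨prev, by simp [runsGo]⟩
  | cons x xs ih =>
    intro ans run prev h
    have h0 : 0 < run := h
    by_cases hx : x = prev
    · have hstep : altStep (ans, run, prev) x = (ans, run + 1, prev) := by
        simp [altStep, hx, h0]
      have hgo : runsGo prev run (x :: xs) = runsGo prev (run + 1) xs := by
        simp [runsGo, hx]
      rw [List.foldl_cons, hstep, hgo]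
      exact ih ans (run + 1) prev (by omega)
    · have hstep : altStep (ans, run, prev) x =
          (ans + (if run == 2 then 2 else 1), 1, x) := by
        simp [altStep, hx, h0]
      have hgo : runsGo prev run (x :: xs) = run :: runsGo x 1 xs := by
        simp [runsGo, hx]
      obtain ⟨y, ys, hl⟩ := List.exists_cons_of_ne_nil (runsGo_ne_nil x 1 xs)
      obtain ⟨v, hv⟩ := ih (ans + (if run == 2 then 2 else 1)) 1 x le_rfl
      refine ⟨v, ?_⟩
      rw [List.foldl_cons, hstep, hv, hgo, hl]
      simp only [List.dropLast_cons₂, List.map_cons, List.sum_cons, List.getLastD_cons,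
        Prod.mk.injEq, gcontrib]
      exact ⟨by ring, trivial⟩

-- B's value on a non-empty sorted list, via the run lengths
lemma alt_char (A : List Int) (x : Int) (xs : List Int)
    (h : PySem.List.sorted A (fun y => y) false = x :: xs) :
    solution_alt A = ((runsGo x 1 xs).map gcontrib).sum
      - (if (runsGo x 1 xs).getLastD 0 == 2 then 1 else 0) := by
  unfold solution_alt
  rw [h, List.foldl_cons]
  have hstep : altStep (0, 0, 0) x = (0, 1, x) := by simp [altStep]
  rw [hstep]
  obtain ⟨v, hv⟩ := foldl_altStep xs 0 1 x le_rfl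
  rw [hv]
  have hne := runsGo_ne_nil x 1 xs
  have hlast : 1 ≤ (runsGo x 1 xs).getLastD 0 :=
    runsGo_pos x 1 xs le_rfl _ (getLastD_mem' _ hne 0)
  have hsum := sum_map_dropLast (runsGo x 1 xs) hne
  simp only [gt_iff_lt]
  rw [if_pos (by omega : 0 < (runsGo x 1 xs).getLastD 0)]
  by_cases h2 : (runsGo x 1 xs).getLastD 0 = 2 <;>
    simp [h2, gcontrib] at hsum ⊢ <;> omega

lemma ofList_acc : ∀ (n : Nat) (xs s : List Int), xs.length ≤ n →
    xs.foldl PySem.Set.add s = s ++ PySem.Set.ofList (xs.filter (fun x => decide (x ∉ s))) := by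
  intro n
  induction n with
  | zero =>
    intro xs s h
    have hx : xs = [] := by cases xs <;> simp_all
    subst hx; simp [PySem.Set.ofList]
  | succ n ih =>
    intro xs s h
    cases xs with
    | nil => simp [PySem.Set.ofList]
    | cons y ys =>
      simp only [List.length_cons, Nat.add_le_add_iff_right] at h
      by_cases hy : y ∈ s
      · rw [List.foldl_cons, PySem.Set.add_of_mem hy, ih ys s h]
        congr 2
        simp [hy]
      · rw [List.foldl_cons, PySem.Set.add_of_not_mem hy, ih ys (s ++ [y]) h]
        have hfil : (y :: ys).filter (fun x => decide (x ∉ s)) =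
            y :: ys.filter (fun x => decide (x ∉ s)) := by simp [hy]
        rw [hfil]
        have hofcons : PySem.Set.ofList (y :: ys.filter (fun x => decide (x ∉ s))) =
            (ys.filter (fun x => decide (x ∉ s))).foldl PySem.Set.add [y] := by
          rw [show (PySem.Set.ofList (y :: ys.filter (fun x => decide (x ∉ s))) : List Int)
              = (y :: ys.filter (fun x => decide (x ∉ s))).foldl PySem.Set.add [] from
            PySem.Set.ofList_eq_foldl _]
          rw [List.foldl_cons, PySem.Set.add_of_not_mem (by simp)]
          rfl
        rw [hofcons, ih (ys.filter (fun x => decide (x ∉ s))) [y]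
          (le_trans (List.length_filter_le _ _) h)]
        rw [List.append_assoc]
        congr 2
        rw [List.filter_filter]
        have heq : ys.filter (fun x => decide (x ∉ s ++ [y])) =
            ys.filter (fun a => decide (a ∉ [y]) && decide (a ∉ s)) := by
          apply List.filter_congr
          intro a _
          by_cases h1 : a ∈ s <;> by_cases h2 : a = y <;> simp [h1, h2]
        rw [heq]

lemma ofList_cons_filter (x : Int) (xs : List Int) :
    PySem.Set.ofList (x :: xs) = x :: PySem.Set.ofList (xs.filter (fun y => decide (y ≠ x))) := by
  rw [show (PySem.Set.ofList (x :: xs) : List Int) = (x :: xs).foldl PySem.Set.add [] from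
    PySem.Set.ofList_eq_foldl _]
  rw [List.foldl_cons, PySem.Set.add_of_not_mem (by simp)]
  rw [show ([] ++ [x] : List Int) = [x] from rfl]
  rw [ofList_acc xs.length xs [x] le_rfl]
  have heq : xs.filter (fun y => decide (y ∉ [x])) = xs.filter (fun y => decide (y ≠ x)) := by
    apply List.filter_congr
    intro a _
    simp
  rw [heq]
  rfl

lemma ofList_sublist : ∀ (n : Nat) (s : List Int), s.length ≤ n →
    (PySem.Set.ofList s : List Int).Sublist s := by
  intro n
  induction n with
  | zero =>
    intro s h
    have hx : s = [] := by cases s <;> simp_all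
    subst hx; simp [PySem.Set.ofList]
  | succ n ih =>
    intro s h
    cases s with
    | nil => simp [PySem.Set.ofList]
    | cons x xs =>
      rw [ofList_cons_filter]
      simp only [List.length_cons, Nat.add_le_add_iff_right] at h
      exact (((ih _ (le_trans (List.length_filter_le _ _) h)).trans
        List.filter_sublist).cons₂ x)

lemma runsGo_sorted (v : Int) (s : List Int) : ∀ (c : Nat),
    (∀ y ∈ s, v ≤ y) → s.Pairwise (· ≤ ·) →
    runsGo v c s = (c + s.count v) :: runLens (s.filter (fun x => decide (x ≠ v))) := by
  induction s with
  | nil => intro c _ _; simp [runsGo, runLens]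
  | cons x xs ih =>
    intro c h1 h2
    by_cases hx : x = v
    · subst hx
      have hrec := ih (c + 1) (fun y hy => h1 y (List.mem_cons_of_mem _ hy)) h2.of_cons
      have hgo : runsGo x c (x :: xs) = runsGo x (c + 1) xs := by simp [runsGo]
      rw [hgo, hrec]
      have hfil : (x :: xs).filter (fun y => decide (y ≠ x)) =
          xs.filter (fun y => decide (y ≠ x)) := by simp
      rw [hfil, List.count_cons_self]
      congr 1
      omega
    · have hvnot : v ∉ x :: xs := by
        intro hmem
        rcases List.mem_cons.mp hmem with h | h
        · exact hx h.symm
        · have hxv : x ≤ v := (List.pairwise_cons.mp h2).1 v h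
          have hvx : v ≤ x := h1 x (List.mem_cons_self)
          exact hx (le_antisymm hxv hvx)
      have hcnt : (x :: xs).count v = 0 := List.count_eq_zero_of_not_mem hvnot
      have hfil : (x :: xs).filter (fun y => decide (y ≠ v)) = x :: xs := by
        apply List.filter_eq_self.mpr
        intro a ha
        simp only [decide_eq_true_eq, ne_eq]
        exact fun hav => hvnot (hav ▸ ha)
      rw [hcnt, hfil]
      simp only [runsGo, runLens]
      rw [if_neg (by simpa using hx)]
      simp

lemma runLens_sorted : ∀ (n : Nat) (s : List Int), s.length ≤ n → s.Pairwise (· ≤ ·) →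
    runLens s = (PySem.Set.ofList s : List Int).map (fun v => s.count v) := by
  intro n
  induction n with
  | zero =>
    intro s h _
    have hx : s = [] := by cases s <;> simp_all
    subst hx; simp [runLens, PySem.Set.ofList]
  | succ n ih =>
    intro s h hpw
    cases s with
    | nil => simp [runLens, PySem.Set.ofList]
    | cons x xs =>
      simp only [List.length_cons, Nat.add_le_add_iff_right] at h
      have h1 : ∀ y ∈ xs, x ≤ y := (List.pairwise_cons.mp hpw).1
      have hrg := runsGo_sorted x xs 1 h1 hpw.of_cons
      have hxscount : (x :: xs).count x = 1 + xs.count x := by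
        rw [List.count_cons_self]; omega
      rw [show runLens (x :: xs) = runsGo x 1 xs from rfl, hrg, ofList_cons_filter]
      rw [List.map_cons, ← hxscount]
      congr 1
      have hfilpw : (xs.filter (fun y => decide (y ≠ x))).Pairwise (· ≤ ·) :=
        hpw.of_cons.sublist List.filter_sublist
      rw [ih _ (le_trans (List.length_filter_le _ _) h) hfilpw]
      apply List.map_congr_left
      intro v hv
      have hvfil : v ∈ xs.filter (fun y => decide (y ≠ x)) :=
        (PySem.Set.mem_ofList _ _).mp hv
      have hvne : v ≠ x := by simpa using List.of_mem_filter hvfil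
      rw [List.count_filter (by simpa using hvne)]
      rw [List.count_cons]
      have hb1 : (v == x) = false := by simpa using hvne
      have hb2 : (x == v) = false := by simpa using hvne.symm
      simp [hb1, hb2]

lemma pairwise_le_getLastD (l : List Int) (h : l.Pairwise (· ≤ ·)) (hne : l ≠ []) (d : Int) :
    ∀ y ∈ l, y ≤ l.getLastD d := by
  induction l generalizing d with
  | nil => simp
  | cons x xs ih =>
    intro y hy
    cases xs with
    | nil => simp at hy ⊢; omega
    | cons z zs =>
      rw [List.getLastD_cons]
      rcases List.mem_cons.mp hy with h' | h'
      · subst h'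
        exact (List.pairwise_cons.mp h).1 _ (getLastD_mem' (z :: zs) (by simp) y)
      · exact ih h.of_cons (by simp) y y h'

lemma cast_beq_two (c : Nat) : (((c : Int)) == (2 : Int)) = (c == 2) := by
  by_cases h : c = 2
  · subst h; simp
  · have h' : (c : Int) ≠ 2 := by exact_mod_cast h
    simp [h, h']

-- A's value: sum of contributions over the distinct values, corrected at the maximum
lemma a_char (A : List Int) (m : Int) (hm : PySem.List.max? A (fun x => x) = some m) :
    solution A = ((PySem.Set.ofList A : List Int).map (fun v => gcontrib (A.count v))).sum
      - (if A.count m == 2 then 1 else 0) := by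
  have hsol : solution A =
      (if (A.foldl (fun d i => d.modify i 0 (· + 1))
            (PySem.Dict.empty : PySem.Dict Int Int)).getD m 0 == 2
       then ((A.foldl (fun d i => d.modify i 0 (· + 1))
              (PySem.Dict.empty : PySem.Dict Int Int)).keys.foldl
              (fun ans num => if (A.foldl (fun d i => d.modify i 0 (· + 1))
                (PySem.Dict.empty : PySem.Dict Int Int)).getD num 0 == 2
                then ans + 2 else ans + 1) (0 : Int)) - 1
       else ((A.foldl (fun d i => d.modify i 0 (· + 1))
              (PySem.Dict.empty : PySem.Dict Int Int)).keys.foldl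
              (fun ans num => if (A.foldl (fun d i => d.modify i 0 (· + 1))
                (PySem.Dict.empty : PySem.Dict Int Int)).getD num 0 == 2
                then ans + 2 else ans + 1) (0 : Int))) := by
    unfold solution
    rw [hm]
  rw [hsol]
  have hkeys : (A.foldl (fun d i => d.modify i 0 (· + 1))
      (PySem.Dict.empty : PySem.Dict Int Int)).keys = (PySem.Set.ofList A : List Int) := by
    rw [PySem.Dict.keys_foldl_modify A 0 (fun _ _ => (· + 1)) PySem.Dict.empty]
    rfl
  have hgetD : ∀ v : Int, (A.foldl (fun d i => d.modify i 0 (· + 1))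
      (PySem.Dict.empty : PySem.Dict Int Int)).getD v 0 = (A.count v : Int) := by
    intro v
    rw [PySem.Dict.getD_foldl_modify_add_one A PySem.Dict.empty v]
    have h0 : (PySem.Dict.empty : PySem.Dict Int Int).getD v 0 = 0 := rfl
    rw [h0]
    omega
  rw [hkeys]
  have hfold : (PySem.Set.ofList A : List Int).foldl
      (fun ans num => if (A.foldl (fun d i => d.modify i 0 (· + 1))
        (PySem.Dict.empty : PySem.Dict Int Int)).getD num 0 == 2 then ans + 2 else ans + 1)
      (0 : Int)
      = ((PySem.Set.ofList A : List Int).map (fun v => gcontrib (A.count v))).sum := by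
    rw [PySem.List.foldl_congr_mem _ _
      (fun acc num => acc + gcontrib (A.count num)) _
      (by
        intro acc x _
        rw [hgetD x, cast_beq_two]
        by_cases hx2 : (A.count x == 2) = true <;> simp [hx2, gcontrib])]
    rw [PySem.List.foldl_add]
    simp
  rw [hfold, hgetD m, cast_beq_two]
  split <;> rename_i hsplit <;> simp [hsplit]

-- ===== VERDICT (by name: the statement is the Claim_ definition above) =====
theorem solution_spec : Claim_equal_solution := by
  intro A _ hpre
  unfold Spec_solution
  obtain ⟨m, hm⟩ : ∃ m, PySem.List.max? A (fun x => x) = some m := by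
    cases hmx : PySem.List.max? A (fun x => x) with
    | none => exact absurd ((PySem.List.max?_eq_none_iff A (fun x => x)).mp hmx) hpre
    | some m => exact ⟨m, rfl⟩
  have hmmem : m ∈ A := PySem.List.max?_mem hm
  have hmmax : ∀ y ∈ A, y ≤ m := by
    have := PySem.List.max?_isMax (key := fun x => x) hm
    simpa using this
  have hperm : (PySem.List.sorted A (fun x => x) false).Perm A :=
    PySem.List.sorted_perm A (fun x => x) false
  have hsne : PySem.List.sorted A (fun x => x) false ≠ [] := by
    intro h
    exact hpre ((PySem.List.sorted_eq_nil_iff A (fun x => x) false).mp h)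
  obtain ⟨x, xs, hcons⟩ := List.exists_cons_of_ne_nil hsne
  have hpw : (PySem.List.sorted A (fun x => x) false).Pairwise (· ≤ ·) := by
    have := PySem.List.sorted_pairwise A (fun x => x)
    simpa using this
  rw [a_char A m hm, alt_char A x xs hcons]
  set s := PySem.List.sorted A (fun x => x) false with hs
  have hrl : runsGo x 1 xs = runLens s := by rw [hcons]; rfl
  rw [hrl, runLens_sorted s.length s le_rfl hpw]
  have hcnt : ∀ v, s.count v = A.count v := fun v => hperm.count_eq v
  have hpermset : (PySem.Set.ofList s : List Int).Perm (PySem.Set.ofList A : List Int) := by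
    rw [List.perm_ext_iff_of_nodup (PySem.Set.nodup_ofList s) (PySem.Set.nodup_ofList A)]
    intro a
    rw [PySem.Set.mem_ofList, PySem.Set.mem_ofList]
    exact hperm.mem_iff
  have hofne : (PySem.Set.ofList s : List Int) ≠ [] := by
    intro h
    have hx : x ∈ (PySem.Set.ofList s : List Int) :=
      (PySem.Set.mem_ofList _ _).mpr (by rw [hcons]; simp)
    rw [h] at hx
    simp at hx
  have hlastval : (PySem.Set.ofList s : List Int).getLastD 0 = m := by
    have hsub : (PySem.Set.ofList s : List Int).Sublist s := ofList_sublist s.length s le_rfl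
    have hpwof : (PySem.Set.ofList s : List Int).Pairwise (· ≤ ·) := hpw.sublist hsub
    have htmem : (PySem.Set.ofList s : List Int).getLastD 0 ∈ s :=
      (PySem.Set.mem_ofList _ _).mp (getLastD_mem' _ hofne 0)
    have htA : (PySem.Set.ofList s : List Int).getLastD 0 ∈ A := hperm.mem_iff.mp htmem
    have h1 : (PySem.Set.ofList s : List Int).getLastD 0 ≤ m := hmmax _ htA
    have hmem2 : m ∈ (PySem.Set.ofList s : List Int) :=
      (PySem.Set.mem_ofList _ _).mpr (hperm.mem_iff.mpr hmmem)
    have h2 : m ≤ (PySem.Set.ofList s : List Int).getLastD 0 :=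
      pairwise_le_getLastD _ hpwof hofne 0 m hmem2
    omega
  have hlastrun : ((PySem.Set.ofList s : List Int).map (fun v => s.count v)).getLastD 0
      = A.count m := by
    rw [getLastD_map' _ _ hofne 0 0, hlastval, hcnt]
  rw [hlastrun]
  have hsum : (((PySem.Set.ofList s : List Int).map (fun v => s.count v)).map gcontrib).sum
      = ((PySem.Set.ofList A : List Int).map (fun v => gcontrib (A.count v))).sum := by
    rw [List.map_map]
    have hfun : ((PySem.Set.ofList s : List Int).map (gcontrib ∘ fun v => s.count v))
        = ((PySem.Set.ofList s : List Int).map (fun v => gcontrib (A.count v))) := by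
      apply List.map_congr_left
      intro v _
      simp [Function.comp, hcnt v]
    rw [hfun]
    exact (hpermset.map (fun v => gcontrib (A.count v))).sum_eq
  rw [hsum]

def solution_raises : Claim_raises_solution := by
  unfold Claim_raises_solution
  exact ⟨fun A _ hr hp => hp hr, by decide⟩
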